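-- pv_equiv track=rewrite | github.com/LenX21/jobeasy-algorithms-course | algorithms_elena/hw_6/divide_and_rule.py | divide_rule_res
-- ===== SOURCE A (Python) =====
-- def divide_rule_res(arr):
--     if len(arr) == 1:
--         return arr[0]
--     else:
--         middle = len(arr) // 2
--         left, right = arr[:middle], arr[middle:]
--         result = sum(left) + sum(right)
--         result += divide_rule_res(left)
--         result += divide_rule_res(right)
--         return result
-- ===== SOURCE B (Python) =====
-- def divide_rule_res(arr):
--     # prefix sums once, then iterate the partition tree with an explicit stack;
--     # each node's segment sum is O(1) via the prefix table -> O(n) total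
--     pref = [0]
--     for x in arr:
--         pref.append(pref[-1] + x)
--     total = 0
--     stack = [(0, len(arr))]
--     while stack:
--         lo, hi = stack.pop()
--         total += pref[hi] - pref[lo]
--         if hi - lo > 1:
--             m = lo + (hi - lo) // 2
--             stack.append((lo, m))
--             stack.append((m, hi))
--     return total
-- ===== Notes on version B (the rewrite author's own statement) =====
-- stated objective: faster
-- what changed: Replaces the recursive divide-and-conquer with slicing and repeated sum() by one prefix-sum table plus an explicit-stack traversal of index ranges, so each node's segment sum is O(1) and no sublists are copied.
-- outside the precondition, e.g. on divide_rule_res([]): A raises RecursionError, B returns 0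
import Mathlib
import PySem

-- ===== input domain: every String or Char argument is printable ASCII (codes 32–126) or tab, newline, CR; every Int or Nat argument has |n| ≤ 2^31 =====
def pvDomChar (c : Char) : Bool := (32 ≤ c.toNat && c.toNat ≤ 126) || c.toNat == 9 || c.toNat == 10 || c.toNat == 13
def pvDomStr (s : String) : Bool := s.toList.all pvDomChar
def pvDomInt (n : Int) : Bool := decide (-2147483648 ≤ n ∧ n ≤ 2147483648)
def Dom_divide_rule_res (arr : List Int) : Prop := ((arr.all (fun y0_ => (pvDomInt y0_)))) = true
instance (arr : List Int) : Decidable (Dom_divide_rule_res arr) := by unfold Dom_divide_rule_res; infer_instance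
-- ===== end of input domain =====

-- B replaces A's recursive slicing/summing with a prefix-sum table and an explicit-stack
-- traversal of index ranges (O(n) instead of O(n log n)); equivalence is about return values.

-- ===== PORT A =====
-- fuel makes the recursion total; arr.length fuel suffices on every nonempty list (Pre_)
def aGo : Nat → List Int → Int
  | 0, _ => 0
  | f + 1, arr =>
    if arr.length = 1 then
      (PySem.List.pyGet? arr 0).getD 0
    else
      let middle : Int := PySem.Int.floordiv (arr.length : Int) 2
      let left := PySem.List.slice arr none (some middle)
      let right := PySem.List.slice arr (some middle) none
      let result := left.sum + right.sum
      result + aGo f left + aGo f right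

def divide_rule_res (arr : List Int) : Int := aGo arr.length arr

-- ===== PORT B =====
-- pref = [0]; for x in arr: pref.append(pref[-1] + x)
def bPrefix (arr : List Int) : List Int :=
  arr.foldl (fun acc x => acc ++ [PySem.List.pyGetD acc (-1) 0 + x]) [0]

-- while stack: pop (lo,hi); total += pref[hi]-pref[lo]; push children if hi-lo>1
-- (fuel makes the while-loop total; 2*len+1 exceeds the number of tree nodes)
def bLoop : Nat → List Int → List (Nat × Nat) → Int → Int
  | 0, _, _, total => total
  | f + 1, pref, stack, total =>
    match stack with
    | [] => total
    | (lo, hi) :: rest =>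
      let total := total + (PySem.List.pyGetD pref (hi : Int) 0 - PySem.List.pyGetD pref (lo : Int) 0)
      if hi - lo > 1 then
        let m := lo + (hi - lo) / 2
        bLoop f pref ((m, hi) :: (lo, m) :: rest) total
      else
        bLoop f pref rest total

def divide_rule_res_alt (arr : List Int) : Int :=
  bLoop (2 * arr.length + 1) (bPrefix arr) [(0, arr.length)] 0

-- ===== PRECONDITION & SPEC =====
-- A recurses forever (RecursionError) on the empty list, so Pre_ excludes exactly [].
def Pre_divide_rule_res (arr : List Int) : Prop := arr ≠ []
instance (arr : List Int) : Decidable (Pre_divide_rule_res arr) := by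
  unfold Pre_divide_rule_res; infer_instance
def pvWitness_divide_rule_res : List Int := [1, -2, 3]

def Spec_divide_rule_res (arr : List Int) (out : Int) : Prop := out = divide_rule_res_alt arr
instance (arr : List Int) (out : Int) : Decidable (Spec_divide_rule_res arr out) := by
  unfold Spec_divide_rule_res; infer_instance

-- ===== CLAIM (what is proved, stated in full; the proofs are below) =====
def Claim_equal_divide_rule_res : Prop := ∀ (arr : List Int), Dom_divide_rule_res arr → Pre_divide_rule_res arr → Spec_divide_rule_res arr (divide_rule_res arr)

-- ===== LEMMAS AND PROOFS =====

-- the common mathematical specification: total of all node sums of the partition tree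
def Tspec (l : List Int) : Int :=
  l.sum + (if l.length ≤ 1 then 0
           else Tspec (l.take (l.length / 2)) + Tspec (l.drop (l.length / 2)))
termination_by l.length
decreasing_by
  all_goals simp [List.length_take, List.length_drop]; omega

-- node-sum function over index ranges, as B traverses them
def gseg (arr : List Int) (lo hi : Nat) : Int :=
  ((arr.take hi).sum - (arr.take lo).sum) +
  (if hi - lo ≤ 1 then 0
   else gseg arr lo (lo + (hi - lo) / 2) + gseg arr (lo + (hi - lo) / 2) hi)
termination_by hi - lo
decreasing_by all_goals omega

theorem aGo_eq_Tspec (f : Nat) : ∀ (arr : List Int), arr ≠ [] → arr.length ≤ f →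
    aGo f arr = Tspec arr := by
  induction f with
  | zero =>
    intro arr hne hlen
    exact absurd (List.length_eq_zero_iff.mp (Nat.le_zero.mp hlen)) hne
  | succ f ih =>
    intro arr hne hlen
    by_cases h1 : arr.length = 1
    · obtain ⟨a, rfl⟩ := List.length_eq_one_iff.mp h1
      simp [aGo, Tspec]
    · have h2 : 2 ≤ arr.length := by
        have := List.length_pos_of_ne_nil hne; omega
      have hmid : PySem.Int.floordiv (arr.length : Int) 2 = ((arr.length / 2 : Nat) : Int) := by
        simp [PySem.Int.floordiv, Int.fdiv_eq_ediv]
      rw [aGo]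
      simp only [h1, if_false, hmid, PySem.List.slice_to_natCast,
        PySem.List.slice_from_natCast]
      have hlt : arr.length / 2 ≥ 1 ∧ arr.length / 2 < arr.length := by omega
      have hltake : (arr.take (arr.length / 2)).length = arr.length / 2 := by
        simp [List.length_take]; omega
      have hldrop : (arr.drop (arr.length / 2)).length = arr.length - arr.length / 2 := by
        simp [List.length_drop]
      have hne1 : arr.take (arr.length / 2) ≠ [] := by
        apply List.ne_nil_of_length_pos; rw [hltake]; omega
      have hne2 : arr.drop (arr.length / 2) ≠ [] := by
        apply List.ne_nil_of_length_pos; rw [hldrop]; omega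
      rw [ih _ hne1 (by omega), ih _ hne2 (by omega)]
      conv_rhs => rw [Tspec]
      have hs : (arr.take (arr.length / 2)).sum + (arr.drop (arr.length / 2)).sum = arr.sum := by
        conv_rhs => rw [← List.take_append_drop (arr.length / 2) arr]
        rw [List.sum_append]
      rw [if_neg (show ¬ arr.length ≤ 1 by omega)]
      linarith [hs]

-- structural prefix-sum list
def prefList : Int → List Int → List Int
  | s, [] => [s]
  | s, x :: xs => s :: prefList (s + x) xs

theorem bPrefix_foldl (xs : List Int) : ∀ (pre : List Int) (s : Int),
    List.foldl (fun acc x => acc ++ [PySem.List.pyGetD acc (-1) 0 + x]) (pre ++ [s]) xs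
      = pre ++ prefList s xs := by
  induction xs with
  | nil => intro pre s; simp [prefList]
  | cons x xs ih =>
    intro pre s
    simp only [List.foldl_cons, PySem.List.pyGetD_neg_one_append_singleton, prefList]
    have : (pre ++ [s]) ++ [s + x] = (pre ++ [s]) ++ [s + x] := rfl
    rw [List.append_assoc pre [s]] at *
    have := ih (pre ++ [s]) (s + x)
    simpa [List.append_assoc] using this

theorem bPrefix_eq (arr : List Int) : bPrefix arr = prefList 0 arr := by
  have := bPrefix_foldl arr [] 0
  simpa [bPrefix] using this

theorem prefList_getD (arr : List Int) : ∀ (s : Int) (i : Nat), i ≤ arr.length →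
    (prefList s arr).getD i 0 = s + (arr.take i).sum := by
  induction arr with
  | nil =>
    intro s i h
    have : i = 0 := by simpa using h
    subst this; simp [prefList]
  | cons x xs ih =>
    intro s i h
    cases i with
    | zero => simp [prefList]
    | succ i =>
      simp only [prefList, List.getD_cons_succ, List.take_succ_cons, List.sum_cons]
      rw [ih (s + x) i (by simpa using h)]
      ring

def nodesOf (m : Nat) : Nat := if m ≤ 1 then 1 else 2 * m - 1

theorem gseg_eq_Tspec (arr : List Int) : ∀ (L lo hi : Nat), hi - lo = L → lo ≤ hi →
    hi ≤ arr.length → gseg arr lo hi = Tspec ((arr.drop lo).take (hi - lo)) := by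
  intro L
  induction L using Nat.strong_induction_on with
  | _ L ih =>
    intro lo hi hL hlohi hn
    have hseglen : ((arr.drop lo).take (hi - lo)).length = hi - lo := by
      simp [List.length_take, List.length_drop]; omega
    have hsum : (arr.take hi).sum - (arr.take lo).sum = ((arr.drop lo).take (hi - lo)).sum := by
      have : arr.take hi = arr.take lo ++ (arr.drop lo).take (hi - lo) := by
        rw [← List.take_add]
        congr 1; omega
      rw [this, List.sum_append]; ring
    by_cases hb : hi - lo ≤ 1
    · rw [gseg, Tspec]
      simp only [hb, if_true, hseglen]
      omega
    · rw [gseg, Tspec]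
      simp only [hb, if_false, hseglen]
      set m := lo + (hi - lo) / 2 with hm
      have htake : ((arr.drop lo).take (hi - lo)).take ((hi - lo) / 2)
          = (arr.drop lo).take (m - lo) := by
        rw [List.take_take]; congr 1; omega
      have hdrop : ((arr.drop lo).take (hi - lo)).drop ((hi - lo) / 2)
          = (arr.drop m).take (hi - m) := by
        rw [List.drop_take, List.drop_drop]
        congr 1
        omega
      rw [htake, hdrop,
        ← ih ((hi - lo) / 2) (by omega) lo m (by omega) (by omega) (by omega),
        ← ih (hi - m) (by omega) m hi (by omega) (by omega) (by omega)]
      rw [hsum]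

theorem bLoop_eq (arr : List Int) (f : Nat) : ∀ (stack : List (Nat × Nat)) (total : Int),
    (stack.map (fun p => nodesOf (p.2 - p.1))).sum ≤ f →
    (∀ p ∈ stack, p.1 ≤ p.2 ∧ p.2 ≤ arr.length) →
    bLoop f (bPrefix arr) stack total
      = total + (stack.map (fun p => gseg arr p.1 p.2)).sum := by
  induction f with
  | zero =>
    intro stack total hfuel _
    cases stack with
    | nil => simp [bLoop]
    | cons p rest =>
      exfalso
      simp only [List.map_cons, List.sum_cons, Nat.le_zero] at hfuel
      have : 1 ≤ nodesOf (p.2 - p.1) := by unfold nodesOf; split <;> omega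
      omega
  | succ f ih =>
    intro stack total hfuel hbnd
    cases stack with
    | nil => simp [bLoop]
    | cons p rest =>
      obtain ⟨lo, hi⟩ := p
      have hplo : lo ≤ hi ∧ hi ≤ arr.length := hbnd (lo, hi) (List.mem_cons_self ..)
      have hgetHi : PySem.List.pyGetD (bPrefix arr) (hi : Int) 0 = (arr.take hi).sum := by
        rw [PySem.List.pyGetD_natCast, bPrefix_eq, prefList_getD arr 0 hi hplo.2]; ring
      have hgetLo : PySem.List.pyGetD (bPrefix arr) (lo : Int) 0 = (arr.take lo).sum := by
        rw [PySem.List.pyGetD_natCast, bPrefix_eq, prefList_getD arr 0 lo (by omega)]; ring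
      simp only [List.map_cons, List.sum_cons] at hfuel ⊢
      by_cases hsplit : hi - lo > 1
      · rw [bLoop]
        simp only [if_pos hsplit, hgetHi, hgetLo]
        set m := lo + (hi - lo) / 2 with hm
        have hnodes : nodesOf (hi - m) + nodesOf (m - lo)
            + (rest.map (fun p => nodesOf (p.2 - p.1))).sum ≤ f := by
          have h1 : nodesOf (hi - lo) = 2 * (hi - lo) - 1 := by
            unfold nodesOf; rw [if_neg (by omega)]
          have h2 : nodesOf (hi - m) ≤ 2 * (hi - m) - 1 + 0 := by
            unfold nodesOf; split <;> omega
          have h3 : nodesOf (m - lo) ≤ 2 * (m - lo) - 1 + 0 := by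
            unfold nodesOf; split <;> omega
          omega
        rw [ih ((m, hi) :: (lo, m) :: rest) _
          (by simp only [List.map_cons, List.sum_cons]; omega)
          (by intro q hq
              simp only [List.mem_cons] at hq
              rcases hq with rfl | rfl | hq
              · exact ⟨by omega, by omega⟩
              · exact ⟨by omega, by omega⟩
              · exact hbnd q (List.mem_cons_of_mem _ hq))]
        have hg : gseg arr lo hi = ((arr.take hi).sum - (arr.take lo).sum)
            + (gseg arr lo m + gseg arr m hi) := by
          rw [gseg]; rw [if_neg (by omega)]
        simp only [List.map_cons, List.sum_cons]
        rw [hg]; ring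
      · rw [bLoop]
        simp only [if_neg hsplit, hgetHi, hgetLo]
        have hnode1 : nodesOf (hi - lo) = 1 := by unfold nodesOf; rw [if_pos (by omega)]
        rw [ih rest _ (by omega) (fun q hq => hbnd q (List.mem_cons_of_mem _ hq))]
        have hg : gseg arr lo hi = (arr.take hi).sum - (arr.take lo).sum := by
          rw [gseg]; rw [if_pos (by omega)]; ring
        rw [hg]; ring

-- ===== VERDICT (by name: the statement is the Claim_ definition above) =====
theorem divide_rule_res_spec : Claim_equal_divide_rule_res := by
  intro arr _ hpre
  unfold Spec_divide_rule_res divide_rule_res divide_rule_res_alt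
  have hn : 1 ≤ arr.length := List.length_pos_of_ne_nil hpre
  rw [aGo_eq_Tspec arr.length arr hpre (le_refl _)]
  rw [bLoop_eq arr (2 * arr.length + 1) [(0, arr.length)] 0
    (by simp [nodesOf]; split <;> omega)
    (by rintro ⟨a, b⟩ hp; simp at hp; omega)]
  have := gseg_eq_Tspec arr arr.length 0 arr.length rfl (by omega) (le_refl _)
  simp only [List.map_cons, List.map_nil, List.sum_cons, List.sum_nil] at *
  rw [this]
  simp
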